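-- pv_equiv track=rewrite | github.com/22eming/- | 프로그래머스/unrated/138476. 귤 고르기/귤 고르기.py | solution
-- ===== SOURCE A (Python) =====
-- def solution(k, tangerine):
--     dict2tan = dict()
--     for tanger in tangerine:
--         if not dict2tan.get(tanger):
--             dict2tan[tanger] = 1
--         else:
--             dict2tan[tanger] += 1
--
--     val = sorted(dict2tan.values(),reverse=True)
--     for i, v in enumerate(val):
--         k -= v
--         if k <= 0:
--             return i+1
-- ===== SOURCE B (Python) =====
-- def solution(k, tangerine):
--     # Counting-sort style: bucket kinds by frequency, then scan counts high-to-low.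
--     freq = {}
--     for t in tangerine:
--         freq[t] = freq.get(t, 0) + 1
--     m = max(freq.values(), default=0)
--     bucket = {}
--     for c in freq.values():
--         bucket[c] = bucket.get(c, 0) + 1
--     kinds = 0
--     for c in range(m, 0, -1):
--         for _ in range(bucket.get(c, 0)):
--             k -= c
--             kinds += 1
--             if k <= 0:
--                 return kinds
-- ===== Notes on version B (the rewrite author's own statement) =====
-- stated objective: alternative
-- what changed: Replaces the comparison sort of the frequency values by a counting-sort: a bucket dict counts how many kinds have each frequency and a descending scan over possible counts consumes k, so no sorted list is ever built.
-- outside the precondition, e.g. on solution(5, [1, 2]): A returns None, B returns None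
import Mathlib
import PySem

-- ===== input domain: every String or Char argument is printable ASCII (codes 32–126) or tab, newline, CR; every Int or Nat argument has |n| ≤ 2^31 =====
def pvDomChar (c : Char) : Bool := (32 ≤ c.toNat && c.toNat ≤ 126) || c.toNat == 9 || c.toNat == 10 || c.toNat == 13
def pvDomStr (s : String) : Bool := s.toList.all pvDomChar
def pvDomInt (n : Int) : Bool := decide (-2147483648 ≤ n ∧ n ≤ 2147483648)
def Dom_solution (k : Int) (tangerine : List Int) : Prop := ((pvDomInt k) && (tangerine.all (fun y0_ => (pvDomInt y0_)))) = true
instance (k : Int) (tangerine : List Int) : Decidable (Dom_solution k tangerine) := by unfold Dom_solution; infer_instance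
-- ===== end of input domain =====

-- B replaces the comparison sort of the frequency values by a counting-sort bucket scan
-- over counts from the maximum down to 1 (objective: alternative algorithm, same results).


-- ===== PORT A =====
-- the 'for i, v in enumerate(val): k -= v; if k <= 0: return i+1' loop (falls through → Python None)
def scanA_solution (k : Int) (i : Int) : List Int → Option Int
  | [] => none
  | v :: rest => if k - v ≤ 0 then some (i + 1) else scanA_solution (k - v) (i + 1) rest

def solution (k : Int) (tangerine : List Int) : Int :=
  let dict2tan := tangerine.foldl (fun d t =>
    match d.get? t with                         -- 'if not dict2tan.get(tanger)': falsy = None or 0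
    | none => d.insert t 1
    | some v => if v == 0 then d.insert t 1 else d.insert t (v + 1)) PySem.Dict.empty
  let val := PySem.List.sorted dict2tan.values (fun x => x) true
  (scanA_solution k 0 val).getD 0               -- Python returns None on fall-through; excluded by Pre_

-- ===== PORT B =====
-- inner 'for _ in range(bucket.get(c, 0))' loop: returns the answer or the updated (k, kinds)
def innerB_solution (c : Int) : Nat → Int → Int → (Int × Int) ⊕ Int
  | 0, k, kinds => Sum.inl (k, kinds)
  | n + 1, k, kinds =>
    if k - c ≤ 0 then Sum.inr (kinds + 1) else innerB_solution c n (k - c) (kinds + 1)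

-- outer 'for c in range(m, 0, -1)' loop
def outerB_solution (bucket : PySem.Dict Int Int) : List Int → Int → Int → Option Int
  | [], _, _ => none
  | c :: cs, k, kinds =>
    match innerB_solution c (bucket.getD c 0).toNat k kinds with
    | Sum.inr ans => some ans
    | Sum.inl (k', kinds') => outerB_solution bucket cs k' kinds'

def solution_alt (k : Int) (tangerine : List Int) : Int :=
  let freq := tangerine.foldl (fun d t => d.insert t (d.getD t 0 + 1)) PySem.Dict.empty
  let m := (PySem.List.max? freq.values (fun x => x)).getD 0
  let bucket := freq.values.foldl (fun d c => d.insert c (d.getD c 0 + 1)) PySem.Dict.empty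
  (outerB_solution bucket (PySem.List.pyRange m 0 (-1)) k 0).getD 0

-- ===== PRECONDITION & SPEC =====
-- Pre_ excludes exactly the inputs (empty list, or k larger than the number of tangerines) on
-- which Python A falls off the loop and returns None — not an int; B does the same there.
def Pre_solution (k : Int) (tangerine : List Int) : Prop :=
  tangerine ≠ [] ∧ k ≤ tangerine.length
instance (k : Int) (tangerine : List Int) : Decidable (Pre_solution k tangerine) := by
  unfold Pre_solution; infer_instance

def pvWitness_solution : Int × List Int := (3, [1, 2, 2])

def Spec_solution (k : Int) (tangerine : List Int) (out : Int) : Prop := out = solution_alt k tangerine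
instance (k : Int) (tangerine : List Int) (out : Int) : Decidable (Spec_solution k tangerine out) := by unfold Spec_solution; infer_instance

-- ===== CLAIM (what is proved, stated in full; the proofs are below) =====
def Claim_equal_solution : Prop := ∀ (k : Int) (tangerine : List Int), Dom_solution k tangerine → Pre_solution k tangerine → Spec_solution k tangerine (solution k tangerine)

-- ===== LEMMAS AND PROOFS =====

-- A's dict-building step equals B's (stored counts are written back via getD)
lemma stepA_eq_stepB : (fun (d : PySem.Dict Int Int) t =>
    match d.get? t with
    | none => d.insert t 1
    | some v => if v == 0 then d.insert t 1 else d.insert t (v + 1))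
  = (fun (d : PySem.Dict Int Int) t => d.insert t (d.getD t 0 + 1)) := by
  funext d t
  cases h : d.get? t with
  | none => simp [PySem.Dict.getD_eq_get?_getD, h]
  | some v =>
    by_cases hv : v = 0 <;>
      simp [PySem.Dict.getD_eq_get?_getD, h, hv]

lemma scanA_append (ys : List Int) : ∀ (xs : List Int) (k i : Int),
    scanA_solution k i (xs ++ ys)
      = match scanA_solution k i xs with
        | some a => some a
        | none => scanA_solution (k - xs.sum) (i + xs.length) ys := by
  intro xs
  induction xs with
  | nil => intro k i; simp [scanA_solution]
  | cons v rest ih =>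
    intro k i
    simp only [List.cons_append, scanA_solution]
    split_ifs with h
    · rfl
    · rw [ih]
      have h1 : k - v - rest.sum = k - (v :: rest).sum := by simp; ring
      have h2 : i + 1 + (rest.length : Int) = i + ((v :: rest).length : Int) := by
        simp; ring
      rw [h1, h2]

lemma innerB_spec (c : Int) : ∀ (n : Nat) (k i : Int),
    innerB_solution c n k i
      = match scanA_solution k i (List.replicate n c) with
        | some a => Sum.inr a
        | none => Sum.inl (k - n * c, i + n) := by
  intro n
  induction n with
  | zero => intro k i; simp [innerB_solution, List.replicate, scanA_solution]
  | succ n ih =>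
    intro k i
    simp only [List.replicate, scanA_solution, innerB_solution]
    split_ifs with h
    · rfl
    · rw [ih]
      cases hs : scanA_solution (k - c) (i + 1) (List.replicate n c) with
      | some a => simp
      | none =>
        simp only
        have h1 : k - c - n * c = k - (n + 1 : Nat) * c := by push_cast; ring
        have h2 : i + 1 + (n : Int) = i + ((n + 1 : Nat) : Int) := by push_cast; ring
        rw [h1, h2]

lemma outerB_spec (bucket : PySem.Dict Int Int) : ∀ (cs : List Int) (k i : Int),
    outerB_solution bucket cs k i
      = scanA_solution k i (cs.flatMap (fun c => List.replicate (bucket.getD c 0).toNat c)) := by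
  intro cs
  induction cs with
  | nil => intro k i; simp [outerB_solution, scanA_solution]
  | cons c cs ih =>
    intro k i
    simp only [outerB_solution, List.flatMap_cons]
    rw [innerB_spec, scanA_append]
    cases hs : scanA_solution k i (List.replicate (bucket.getD c 0).toNat c) with
    | some a => simp
    | none =>
      simp only
      rw [ih]
      congr 1 <;> simp [List.sum_replicate]

lemma flat_perm : ∀ (m : Nat) (l : List Int), (∀ v ∈ l, 1 ≤ v ∧ v ≤ (m : Int)) →
    ((PySem.List.pyRange m 0 (-1)).flatMap (fun c => List.replicate (l.count c) c)).Perm l := by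
  intro m
  induction m with
  | zero =>
    intro l hb
    rw [PySem.List.pyRange_neg_one_eq_nil (by norm_num)]
    cases l with
    | nil => simp
    | cons v t => exact absurd (hb v (by simp)) (by push_cast; omega)
  | succ m ih =>
    intro l hb
    have hm : (0:Int) < ((m+1 : Nat) : Int) := by push_cast; omega
    rw [PySem.List.pyRange_neg_one_cons hm, List.flatMap_cons]
    set M : Int := ((m+1 : Nat) : Int) with hM
    have hM1 : M - 1 = (m : Int) := by rw [hM]; push_cast; ring
    set l' : List Int := l.filter (fun x => !(x == M)) with hl'
    have hcongr : (PySem.List.pyRange (M - 1) 0 (-1)).flatMap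
        (fun c => List.replicate (l.count c) c)
        = (PySem.List.pyRange (M - 1) 0 (-1)).flatMap (fun c => List.replicate (l'.count c) c) := by
      apply List.flatMap_congr
      intro c hc
      rw [PySem.List.mem_pyRange_neg_one] at hc
      have : l'.count c = l.count c := by
        rw [hl']
        apply List.count_filter
        simp only [Bool.not_eq_eq_eq_not, Bool.not_true, beq_eq_false_iff_ne, ne_eq]
        omega
      rw [this]
    rw [hcongr, hM1]
    have hperm' : ((PySem.List.pyRange (m:Int) 0 (-1)).flatMap
        (fun c => List.replicate (l'.count c) c)).Perm l' := by
      apply ih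
      intro v hv
      rw [hl', List.mem_filter] at hv
      have := hb v hv.1
      have hne : v ≠ M := by simpa using hv.2
      rw [hM] at hne
      push_cast at this ⊢
      omega
    have hrep : List.replicate (l.count M) M = l.filter (· == M) := (List.filter_beq (l := l) (a := M)).symm
    exact (hperm'.append_left _).trans (by rw [hrep]; exact List.filter_append_perm _ l)

lemma flatMap_replicate_pairwise (f : Int → Nat) : ∀ (cs : List Int), cs.Pairwise (fun a b => b < a) →
    ((cs.flatMap (fun c => List.replicate (f c) c)).Pairwise (fun a b => b ≤ a)) := by
  intro cs
  induction cs with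
  | nil => intro _; simp
  | cons c cs ih =>
    intro h
    rw [List.pairwise_cons] at h
    rw [List.flatMap_cons, List.pairwise_append]
    refine ⟨List.pairwise_replicate.mpr (Or.inr le_rfl), ih h.2, ?_⟩
    intro a ha b hb
    have ha' : a = c := List.eq_of_mem_replicate ha
    rw [List.mem_flatMap] at hb
    obtain ⟨c', hc', hb'⟩ := hb
    have hb'' : b = c' := List.eq_of_mem_replicate hb'
    have := h.1 c' hc'
    omega

lemma pyRange_neg_pairwise (m : Int) : (PySem.List.pyRange m 0 (-1)).Pairwise (fun a b => b < a) := by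
  rw [PySem.List.pyRange_neg_one_eq_reverse, List.pairwise_reverse]
  exact PySem.List.pairwise_lt_pyRange_one _ _

-- the counting-sort flattening IS the reverse-sorted value list
lemma flat_eq_sorted (m : Nat) (l : List Int)
    (hp : ((PySem.List.pyRange m 0 (-1)).flatMap (fun c => List.replicate (l.count c) c)).Perm l) :
    (PySem.List.pyRange m 0 (-1)).flatMap (fun c => List.replicate (l.count c) c)
      = PySem.List.sorted l (fun x => x) true := by
  apply PySem.List.eq_of_perm_of_pairwise_le_of_injective (key := fun x : Int => -x)
  · intro a b hab; simpa using hab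
  · exact hp.trans (PySem.List.sorted_perm l (fun x => x) true).symm
  · exact (flatMap_replicate_pairwise _ _ (pyRange_neg_pairwise _)).imp (by intro a b h; simpa)
  · exact (PySem.List.sorted_pairwise_rev l (fun x => x)).imp (by intro a b h; simpa)

lemma vals_bounds (tangerine : List Int) :
    ∀ v ∈ (PySem.Dict.counter tangerine).values, 1 ≤ v ∧
      v ≤ (PySem.List.max? (PySem.Dict.counter tangerine).values (fun x => x)).getD 0 := by
  intro v hv
  constructor
  · have : v ∈ (PySem.Dict.counter tangerine).items.map (fun p => p.2) := hv
    rw [PySem.Dict.items_counter, List.map_map, List.mem_map] at this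
    obtain ⟨t, ht, hvt⟩ := this
    have htm : t ∈ tangerine := (PySem.Set.mem_ofList _ _).mp ht
    have : 0 < tangerine.count t := List.count_pos_iff.mpr htm
    simp only [Function.comp] at hvt
    omega
  · cases hmax : PySem.List.max? (PySem.Dict.counter tangerine).values (fun x => x) with
    | none =>
      rw [PySem.List.max?_eq_none_iff] at hmax
      rw [hmax] at hv
      simp at hv
    | some mv =>
      simpa using PySem.List.max?_isMax hmax v hv

-- ===== VERDICT (by name: the statement is the Claim_ definition above) =====
theorem solution_spec : Claim_equal_solution := by
  intro k tangerine _ _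
  unfold Spec_solution solution solution_alt
  dsimp only
  rw [stepA_eq_stepB]
  rw [PySem.Dict.foldl_insert_getD_add_one_eq_counter]
  set vals : List Int := (PySem.Dict.counter tangerine).values with hvals
  rw [PySem.Dict.foldl_insert_getD_add_one_eq_counter]
  set m : Int := (PySem.List.max? vals (fun x => x)).getD 0 with hm
  have hb := vals_bounds tangerine
  rw [← hvals, ← hm] at hb
  have hm0 : 0 ≤ m := by
    rw [hm]
    cases hmax : PySem.List.max? vals (fun x => x) with
    | none => simp
    | some mv =>
      have := (hb mv (PySem.List.max?_mem hmax)).1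
      simpa using by omega
  have hMm : ((m.toNat : Nat) : Int) = m := Int.toNat_of_nonneg hm0
  rw [outerB_spec]
  have hcnt : (fun c => List.replicate ((PySem.Dict.counter vals).getD c 0).toNat c)
      = (fun c => List.replicate (vals.count c) c) := by
    funext c
    rw [PySem.Dict.getD_counter]
    simp
  rw [hcnt, ← hMm]
  rw [flat_eq_sorted _ _ (flat_perm m.toNat vals (by rw [hMm]; exact hb))]
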